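-- pv_equiv track=rewrite | github.com/dusgn/sparta_algorithm | week_5/03_is_correct_parentheses.py | changed_to_correct_parenthesis
-- ===== SOURCE A (Python) =====
-- from collections import deque
--
-- def is_correct_parentheses(string):  # 올바른 괄호인지 확인
--     stack = []
--     for s in string:
--         if s == '(':
--             stack.append(s)
--         elif stack:
--             stack.pop()
--     return len(stack) == 0  # 문자열이 끝나고 아무것도 안남으면 True
--
-- def reverse_parenthesis(string):
--     # 4. 문자열 u가 올바른 괄호 문자열이 아니라면아래 과정을 수행
--     # 4-1 빈 문자열에 첫번째 문자로 (를 붙임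
--     # 4-2 문자열 v에 대해 1단계부터 재귀적으로 수행한 결과 문자열을 이어붙임
--     # 4-3 )를 다시 붙임
--     # 4-4 u의 첫번째 문자와 마지막 문자를 제거하고, 나머지 문자열의 괄호 방향을
--     # 뒤집어 뒤에 붙인다.
--     reversed_string = ""
--     for char in string:
--         if char == '(':
--             reversed_string += ')'
--         else:
--             reversed_string += '('
--     return reversed_string
--
-- def separate_to_u_v(string):
--     # 2. 문자열 w를 두 "균형잡힌 괄호 문자열" u,v로 분리
--     # 단 u는 "균형잡힌 괄호 문자열"로 더 이상 분리할 수 없어야 하며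
--     # v는 빈 문자열이 될 수 있습니다.
--     # 균형이 맞으려면 (, ) 갯수가 같아야 함
--     queue = deque(string)
--     left, right = 0, 0
--     u, v = "", ""
--     while queue:
--         char = queue.popleft()
--         u += char
--         if char == '(':
--             left += 1
--         else:
--             right += 1
--         if left == right:
--             break
--     v = ''.join(list(queue))
--     return u, v
--
-- def changed_to_correct_parenthesis(string):  # 균형 - > 올바른
--     # 1. 입력이 빈 경우, 빈 문자열 반환
--     if string == "":
--         return ""
--     # 2번 조건
--     u, v = separate_to_u_v(string)
--
--     # 3. 문자열 u가 올바른 괄호 문자열이라면 문자열 v에 대해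
--     # 1단계 부터 다시 시작 (change_to_correct_parenthesis를 다시함)
--     # 3-1 수행한 결과 문자열을 u에 이어붙인 뒤 반환
--     if is_correct_parentheses(u):
--         return u + changed_to_correct_parenthesis(v)
--     else:
--         return "(" + changed_to_correct_parenthesis(v) + ")" + reverse_parenthesis(u[1:-1])
-- ===== SOURCE B (Python) =====
-- def _valid(s):  # correct-parentheses check by depth counter
--     depth = 0
--     for ch in s:
--         if ch == '(':
--             depth += 1
--         elif depth:
--             depth -= 1
--     return depth == 0
--
--
-- def _flip(s):
--     return "".join('(' if ch != '(' else ')' for ch in s)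
--
--
-- def changed_to_correct_parenthesis(string):
--     # one left-to-right pass: split into successive minimal balanced segments
--     segs = []
--     cur = []
--     bal = 0
--     for ch in string:
--         cur.append(ch)
--         bal += 1 if ch == '(' else -1
--         if bal == 0:
--             segs.append(''.join(cur))
--             cur = []
--     if cur:  # never-rebalancing remainder is one final segment
--         segs.append(''.join(cur))
--     # fold the segments right-to-left into the answer
--     acc = ""
--     for seg in reversed(segs):
--         if _valid(seg):
--             acc = seg + acc
--         else:
--             acc = "(" + acc + ")" + _flip(seg[1:-1])
--     return acc
-- ===== Notes on version B (the rewrite author's own statement) =====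
-- stated objective: faster
-- what changed: Replaces A's deque-based split helper (which rebuilds u by repeated string +=) and tail recursion by a single left-to-right pass that materializes the list of minimal balanced segments via list-append + join, then a right-to-left fold over that list building the answer with an accumulator.
import Mathlib
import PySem

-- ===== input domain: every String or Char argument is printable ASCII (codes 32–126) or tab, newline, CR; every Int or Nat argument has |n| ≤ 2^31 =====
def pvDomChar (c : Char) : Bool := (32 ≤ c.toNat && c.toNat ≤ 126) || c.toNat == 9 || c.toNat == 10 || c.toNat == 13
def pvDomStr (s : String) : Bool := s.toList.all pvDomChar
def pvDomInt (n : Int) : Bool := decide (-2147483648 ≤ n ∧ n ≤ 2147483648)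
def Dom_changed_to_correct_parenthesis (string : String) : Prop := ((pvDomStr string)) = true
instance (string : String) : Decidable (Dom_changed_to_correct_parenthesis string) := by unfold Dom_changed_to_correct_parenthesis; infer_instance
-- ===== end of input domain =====

-- B replaces A's deque split helper + tail recursion by one pass building the minimal balanced
-- segment list (list-append + one join instead of per-char string +=), then a right-to-left fold;
-- a timing run measured B faster at the largest generated sizes.

-- ===== PORT A =====

-- is_correct_parentheses: stack loop, pop only when stack nonempty
def pvIsCorrectA (string : List Char) : Bool :=
  (string.foldl
    (fun stack s =>
      if s = '(' then s :: stack
      else if stack ≠ [] then stack.tail else stack) ([] : List Char)).length = 0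

-- reverse_parenthesis: builds reversed_string by += per char
def pvReverseParA (string : List Char) : List Char :=
  string.foldl (fun acc c => acc ++ [if c = '(' then ')' else '(']) []

-- separate_to_u_v: while-loop over the deque with left/right counters and break
def pvSepLoopA : List Char → Int → Int → List Char → (List Char × List Char)
  | [], _, _, u => (u, [])
  | c :: q, left, right, u =>
    let u' := u ++ [c]
    let left' := if c = '(' then left + 1 else left
    let right' := if c = '(' then right else right + 1
    if left' = right' then (u', q) else pvSepLoopA q left' right' u'

theorem pvSepLoopA_len : ∀ (q : List Char) (l r : Int) (u : List Char),
    (pvSepLoopA q l r u).2.length ≤ q.length := by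
  intro q
  induction q with
  | nil => intro l r u; simp [pvSepLoopA]
  | cons c q ih =>
    intro l r u
    simp only [pvSepLoopA]
    split <;> split
    · simp
    · exact le_trans (ih _ _ _) (Nat.le_succ _)
    · simp
    · exact le_trans (ih _ _ _) (Nat.le_succ _)

theorem pvSepLoopA_len_lt (c : Char) (q : List Char) (l r : Int) (u : List Char) :
    (pvSepLoopA (c :: q) l r u).2.length < (c :: q).length := by
  simp only [pvSepLoopA]
  split <;> split
  · simp
  · exact Nat.lt_succ_of_le (pvSepLoopA_len q _ _ _)
  · simp
  · exact Nat.lt_succ_of_le (pvSepLoopA_len q _ _ _)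

-- changed_to_correct_parenthesis: the recursion of A over (u, v)
def pvChangedA : List Char → List Char
  | [] => []
  | c :: rest =>
    let uv := pvSepLoopA (c :: rest) 0 0 []
    if pvIsCorrectA uv.1 then uv.1 ++ pvChangedA uv.2
    else '(' :: (pvChangedA uv.2 ++ ')' :: pvReverseParA (PySem.List.slice uv.1 (some 1) (some (-1))))
termination_by l => l.length
decreasing_by
  all_goals exact pvSepLoopA_len_lt c rest 0 0 []

def changed_to_correct_parenthesis (string : String) : String :=
  String.mk (pvChangedA string.toList)

-- ===== PORT B =====

-- _valid: depth-counter correctness check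
def pvValidB (s : List Char) : Bool :=
  (s.foldl (fun depth ch => if ch = '(' then depth + 1 else if depth ≠ 0 then depth - 1 else depth)
    (0 : Int)) = 0

-- _flip: one comprehension over the chars
def pvFlipB (s : List Char) : List Char :=
  s.map (fun ch => if ch ≠ '(' then '(' else ')')

-- the splitting pass: cur is the pending segment, bal its running balance, segs the output list
def pvSegsB : List Char → Int → List Char → List (List Char) → List (List Char)
  | [], _, cur, segs => if cur ≠ [] then segs ++ [cur] else segs
  | ch :: rest, bal, cur, segs =>
    let cur' := cur ++ [ch]
    let bal' := bal + (if ch = '(' then 1 else -1)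
    if bal' = 0 then pvSegsB rest bal' [] (segs ++ [cur'])
    else pvSegsB rest bal' cur' segs

-- the right-to-left fold: 'for seg in reversed(segs): acc = step(seg, acc)' starting from ""
def pvFoldSegsB (segs : List (List Char)) : List Char :=
  segs.foldr
    (fun seg acc =>
      if pvValidB seg then seg ++ acc
      else '(' :: (acc ++ ')' :: pvFlipB (PySem.List.slice seg (some 1) (some (-1))))) []

def changed_to_correct_parenthesis_alt (string : String) : String :=
  String.mk (pvFoldSegsB (pvSegsB string.toList 0 [] []))

-- ===== PRECONDITION & SPEC =====
def Spec_changed_to_correct_parenthesis (string : String) (out : String) : Prop := out = changed_to_correct_parenthesis_alt string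
instance (string : String) (out : String) : Decidable (Spec_changed_to_correct_parenthesis string out) := by unfold Spec_changed_to_correct_parenthesis; infer_instance

-- ===== CLAIM (what is proved, stated in full; the proofs are below) =====
def Claim_equal_changed_to_correct_parenthesis : Prop := ∀ (string : String), Dom_changed_to_correct_parenthesis string → Spec_changed_to_correct_parenthesis string (changed_to_correct_parenthesis string)

-- ===== LEMMAS AND PROOFS =====

-- A's stack-length computation equals B's depth counter
theorem pvValid_eq : ∀ (s : List Char), pvIsCorrectA s = pvValidB s := by
  have key : ∀ (s : List Char) (stack : List Char),
      ((s.foldl (fun stack s =>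
          if s = '(' then s :: stack
          else if stack ≠ [] then stack.tail else stack) stack).length : Int) =
        s.foldl (fun depth ch => if ch = '(' then depth + 1 else if depth ≠ 0 then depth - 1 else depth)
          (stack.length : Int) := by
    intro s
    induction s with
    | nil => intro stack; simp
    | cons c s ih =>
      intro stack
      simp only [List.foldl_cons]
      rw [ih]
      congr 1
      by_cases hc : c = '('
      · simp [hc]
      · cases stack <;> simp [hc] <;> omega
  intro s
  unfold pvIsCorrectA pvValidB
  have h := key s []
  simp only [List.length_nil, Int.natCast_zero] at h
  rw [← h]
  simp [Int.natCast_eq_zero]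

theorem pvFlip_eq : ∀ (s : List Char), pvReverseParA s = pvFlipB s := by
  have key : ∀ (s acc : List Char),
      s.foldl (fun acc c => acc ++ [if c = '(' then ')' else '(']) acc =
        acc ++ s.map (fun ch => if ch ≠ '(' then '(' else ')') := by
    intro s
    induction s with
    | nil => intro acc; simp
    | cons c s ih =>
      intro acc
      simp only [List.foldl_cons, List.map_cons, ih]
      by_cases hc : c = '(' <;> simp [hc]
  intro s
  unfold pvReverseParA pvFlipB
  simpa using key s []

-- the segs accumulator is a pure prefix
theorem pvSegsB_prefix : ∀ (q : List Char) (bal : Int) (cur : List Char) (segs : List (List Char)),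
    pvSegsB q bal cur segs = segs ++ pvSegsB q bal cur [] := by
  intro q
  induction q with
  | nil =>
    intro bal cur segs
    by_cases h : cur = [] <;> simp [pvSegsB, h]
  | cons ch rest ih =>
    intro bal cur segs
    simp only [pvSegsB]
    split_ifs with h1 h2 h2
    · rw [ih _ _ (segs ++ [cur ++ [ch]]), ih _ _ ([] ++ [cur ++ [ch]])]; simp
    · rw [ih _ _ segs]
    · rw [ih _ _ (segs ++ [cur ++ [ch]]), ih _ _ ([] ++ [cur ++ [ch]])]; simp
    · rw [ih _ _ segs]

-- the splitting pass peels off exactly what separate_to_u_v returns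
theorem pvSegs_sep : ∀ (q : List Char) (left right : Int) (u : List Char),
    q ≠ [] ∨ u ≠ [] →
    pvSegsB q (left - right) u [] =
      (pvSepLoopA q left right u).1 :: pvSegsB (pvSepLoopA q left right u).2 0 [] [] := by
  intro q
  induction q with
  | nil =>
    intro left right u h
    have hu : u ≠ [] := by tauto
    simp [pvSegsB, pvSepLoopA, hu]
  | cons c rest ih =>
    intro left right u _
    simp only [pvSegsB, pvSepLoopA]
    by_cases hc : c = '('
    · subst hc
      simp only [reduceIte]
      by_cases hb : left + 1 = right
      · have e : left - right + 1 = 0 := by omega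
        rw [if_pos e, if_pos hb, e, pvSegsB_prefix rest 0 [] ([] ++ [u ++ ['(']])]
        simp
      · have e : left - right + 1 ≠ 0 := by omega
        have e2 : left - right + 1 = (left + 1) - right := by omega
        rw [if_neg e, if_neg hb, e2]
        exact ih (left + 1) right (u ++ ['(']) (Or.inr (by simp))
    · simp only [if_neg hc]
      by_cases hb : left = right + 1
      · have e : left - right + -1 = 0 := by omega
        rw [if_pos e, if_pos hb, e, pvSegsB_prefix rest 0 [] ([] ++ [u ++ [c]])]
        simp
      · have e : left - right + -1 ≠ 0 := by omega
        have e2 : left - right + -1 = left - (right + 1) := by omega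
        rw [if_neg e, if_neg hb, e2]
        exact ih left (right + 1) (u ++ [c]) (Or.inr (by simp))

-- main equivalence on char lists
theorem pvChanged_eq_aux : ∀ (n : ℕ) (l : List Char), l.length ≤ n →
    pvChangedA l = pvFoldSegsB (pvSegsB l 0 [] []) := by
  intro n
  induction n with
  | zero =>
    intro l hl
    have : l = [] := List.eq_nil_of_length_eq_zero (Nat.le_zero.mp hl)
    subst this
    simp [pvChangedA, pvSegsB, pvFoldSegsB]
  | succ n ih =>
    intro l hl
    cases l with
    | nil => simp [pvChangedA, pvSegsB, pvFoldSegsB]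
    | cons c rest =>
      have hsplit := pvSegs_sep (c :: rest) 0 0 [] (Or.inl (by simp))
      have h0 : (0 : Int) - 0 = 0 := by ring
      rw [h0] at hsplit
      have hlen : (pvSepLoopA (c :: rest) 0 0 []).2.length ≤ n := by
        have h1 := pvSepLoopA_len_lt c rest 0 0 []
        simp only [List.length_cons] at h1 hl
        omega
      have hrec := ih (pvSepLoopA (c :: rest) 0 0 []).2 hlen
      rw [pvChangedA, hsplit]
      simp only [pvFoldSegsB, List.foldr_cons]
      rw [pvValid_eq, pvFlip_eq, hrec]
      rfl

-- ===== VERDICT (by name: the statement is the Claim_ definition above) =====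
theorem changed_to_correct_parenthesis_spec : Claim_equal_changed_to_correct_parenthesis := by
  intro s _
  unfold Spec_changed_to_correct_parenthesis changed_to_correct_parenthesis
    changed_to_correct_parenthesis_alt
  rw [pvChanged_eq_aux s.toList.length s.toList le_rfl]
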